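-- pv_equiv track=rewrite | github.com/onyuki/1400-zadach-po-programmirivaniu | 6.1-6.35.py | find_n_by_factorial
-- ===== SOURCE A (Python) =====
-- def find_n_by_factorial(F):
--     if F < 1:
--         return None
--     prod = 1
--     n = 1
--     while prod < F:
--         n += 1
--         prod *= n
--     return n if prod == F else None
-- ===== SOURCE B (Python) =====
-- def find_n_by_factorial(F):
--     if F < 1:
--         return None
--     def peel(rem, i):
--         if rem == 1:
--             return i
--         i += 1
--         if rem % i:
--             return None
--         return peel(rem // i, i)
--     return peel(F, 1)
-- ===== Notes on version B (the rewrite author's own statement) =====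
-- stated objective: alternative
-- what changed: B recursively peels F downward, dividing the shrinking quotient by successive integers (early-exit on the first non-divisor), instead of A's iterative loop that grows a factorial product upward and compares it with F.
import Mathlib
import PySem

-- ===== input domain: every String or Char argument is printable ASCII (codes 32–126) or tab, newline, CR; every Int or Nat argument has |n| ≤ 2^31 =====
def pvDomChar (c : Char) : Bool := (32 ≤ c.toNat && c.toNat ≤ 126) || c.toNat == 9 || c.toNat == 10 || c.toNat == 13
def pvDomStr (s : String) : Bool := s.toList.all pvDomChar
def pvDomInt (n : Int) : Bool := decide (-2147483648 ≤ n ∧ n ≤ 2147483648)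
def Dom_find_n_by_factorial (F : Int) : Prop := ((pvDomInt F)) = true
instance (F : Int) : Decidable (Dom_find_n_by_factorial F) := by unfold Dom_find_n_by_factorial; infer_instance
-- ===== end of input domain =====

-- B recursively peels F downward by successive integer division instead of A's loop growing a factorial product; same results, no speed claim.

-- ===== PORT A =====
-- while prod < F: n += 1; prod *= n   (fuel F.toNat+1 only makes the loop total; it is never exhausted: prod grows by ≥1 per step)
def pvLoopA (fuel : Nat) (F prod n : Int) : Option Int :=
  match fuel with
  | 0 => none
  | f + 1 =>
    if prod < F then pvLoopA f F (prod * (n + 1)) (n + 1)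
    else if prod = F then some n else none

def find_n_by_factorial (F : Int) : Option Int :=
  if F < 1 then none else pvLoopA (F.toNat + 1) F 1 1

-- ===== PORT B =====
-- peel(rem, i), carried on Nat since every reachable rem is ≥ 1 (entry guard F ≥ 1, quotients of
-- positives stay positive); the parameter j stands for i - 1, so Python's incremented divisor i+1
-- is j + 2 and the returned i is j + 1; 'rem ≤ 1' is Python's 'rem == 1' on the reachable rem ≥ 1.
def pvPeel (rem j : Nat) : Option Int :=
  if rem ≤ 1 then some ((j : Int) + 1)
  else if rem % (j + 2) ≠ 0 then none
  else pvPeel (rem / (j + 2)) (j + 1)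
decreasing_by exact Nat.div_lt_self (by omega) (by omega)

def find_n_by_factorial_alt (F : Int) : Option Int :=
  if F < 1 then none else pvPeel F.toNat 0

-- ===== PRECONDITION & SPEC =====
def Spec_find_n_by_factorial (F : Int) (out : Option Int) : Prop := out = find_n_by_factorial_alt F
instance (F : Int) (out : Option Int) : Decidable (Spec_find_n_by_factorial F out) := by unfold Spec_find_n_by_factorial; infer_instance

-- ===== CLAIM (what is proved, stated in full; the proofs are below) =====
def Claim_equal_find_n_by_factorial : Prop := ∀ (F : Int), Dom_find_n_by_factorial F → Spec_find_n_by_factorial F (find_n_by_factorial F)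

-- ===== LEMMAS AND PROOFS =====

theorem pvLoopA_some (f : Nat) : ∀ (F : Int) (k m : Nat), 1 ≤ k → k ≤ m →
    ((Nat.factorial m : Nat) : Int) = F → m - k < f →
    pvLoopA f F ((Nat.factorial k : Nat) : Int) (k : Int) = some (m : Int) := by
  induction f with
  | zero => intro F k m hk hkm hF hfuel; omega
  | succ f ih =>
    intro F k m hk hkm hF hfuel
    unfold pvLoopA
    by_cases h : ((Nat.factorial k : Nat) : Int) < F
    · have hkm' : k < m := by
        rcases Nat.lt_or_ge k m with h' | h'
        · exact h'
        · exfalso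
          have h2 : Nat.factorial m ≤ Nat.factorial k := Nat.factorial_le h'
          have h3 : ((Nat.factorial m : Nat) : Int) ≤ ((Nat.factorial k : Nat) : Int) := by
            exact_mod_cast h2
          omega
      have hcast : ((Nat.factorial k : Nat) : Int) * ((k : Int) + 1)
          = ((Nat.factorial (k+1) : Nat) : Int) := by push_cast [Nat.factorial_succ]; ring
      have hcast2 : (k : Int) + 1 = ((k + 1 : Nat) : Int) := by push_cast; ring
      simp only [h, if_true]
      rw [hcast, hcast2]
      exact ih F (k+1) m (by omega) (by omega) hF (by omega)
    · have hle : Nat.factorial k ≤ Nat.factorial m := Nat.factorial_le hkm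
      have hle' : ((Nat.factorial k : Nat) : Int) ≤ ((Nat.factorial m : Nat) : Int) := by
        exact_mod_cast hle
      have heq : ((Nat.factorial k : Nat) : Int) = F := by omega
      have hkm2 : k = m := by
        by_contra hne
        have hlt : k < m := by omega
        have h4 : Nat.factorial k < Nat.factorial m := (Nat.factorial_lt hk).mpr hlt
        have h5 : ((Nat.factorial k : Nat) : Int) < ((Nat.factorial m : Nat) : Int) := by
          exact_mod_cast h4
        omega
      subst hkm2
      simp [heq]

theorem pvLoopA_none (f : Nat) : ∀ (F : Int) (k : Nat), 1 ≤ k →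
    (∀ m : Nat, k ≤ m → ((Nat.factorial m : Nat) : Int) ≠ F) →
    pvLoopA f F ((Nat.factorial k : Nat) : Int) (k : Int) = none := by
  induction f with
  | zero => intro F k hk hno; rfl
  | succ f ih =>
    intro F k hk hno
    unfold pvLoopA
    by_cases h : ((Nat.factorial k : Nat) : Int) < F
    · have hcast : ((Nat.factorial k : Nat) : Int) * ((k : Int) + 1)
          = ((Nat.factorial (k+1) : Nat) : Int) := by push_cast [Nat.factorial_succ]; ring
      have hcast2 : (k : Int) + 1 = ((k + 1 : Nat) : Int) := by push_cast; ring
      simp only [h, if_true]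
      rw [hcast, hcast2]
      exact ih F (k+1) (by omega) (fun m hm => hno m (by omega))
    · have hne : ((Nat.factorial k : Nat) : Int) ≠ F := hno k (le_refl k)
      simp [h, hne]

theorem pvPeel_some (r : Nat) : ∀ (j m : Nat), j + 1 ≤ m →
    Nat.factorial (j + 1) * r = Nat.factorial m →
    pvPeel r j = some (m : Int) := by
  induction r using Nat.strong_induction_on with
  | _ r ih =>
    intro j m hjm hfac
    rw [pvPeel]
    by_cases hr : r ≤ 1
    · have hr1 : r = 1 := by
        have := Nat.factorial_pos m
        have := Nat.factorial_pos (j+1)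
        rcases Nat.lt_or_ge r 1 with h0 | h1
        · exfalso; have : r = 0 := by omega
          subst this; omega
        · omega
      subst hr1
      have hfe : Nat.factorial (j+1) = Nat.factorial m := by omega
      have hm : j + 1 = m := by
        by_contra hne
        have hlt : j + 1 < m := by omega
        have := (Nat.factorial_lt (by omega : 0 < j + 1)).mpr hlt
        omega
      subst hm
      simp
    · have hr2 : 2 ≤ r := by omega
      have hjm' : j + 1 < m := by
        by_contra hne
        have : j + 1 = m := by omega
        subst this
        nlinarith [Nat.factorial_pos (j+1)]
      have hdvdf : Nat.factorial (j+2) ∣ Nat.factorial m := Nat.factorial_dvd_factorial (by omega)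
      have hdvd : (j+2) ∣ r := by
        have hfe : Nat.factorial (j+2) = Nat.factorial (j+1) * (j+2) := by
          rw [Nat.factorial_succ]; ring
        have h2 : Nat.factorial (j+1) * (j+2) ∣ Nat.factorial (j+1) * r := by
          rw [hfac, ← hfe]; exact hdvdf
        exact (Nat.mul_dvd_mul_iff_left (Nat.factorial_pos (j+1))).mp h2
      obtain ⟨r', hr'⟩ := hdvd
      have hdiv : r / (j+2) = r' := by rw [hr']; exact Nat.mul_div_cancel_left r' (by omega)
      have hmod : r % (j+2) = 0 := by rw [hr']; exact Nat.mul_mod_right _ _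
      simp only [hr, if_false, hmod, ne_eq, not_true_eq_false, if_false]
      rw [hdiv]
      have hr'pos : 1 ≤ r' := by
        rcases Nat.eq_zero_or_pos r' with h0 | h0
        · subst h0; simp at hr'; omega
        · exact h0
      have hr'lt : r' < r := by nlinarith
      refine ih r' hr'lt (j+1) m (by omega) ?_
      calc Nat.factorial (j+2) * r' = Nat.factorial (j+1) * ((j+2) * r') := by
            rw [Nat.factorial_succ]; ring
        _ = Nat.factorial (j+1) * r := by rw [← hr']
        _ = Nat.factorial m := hfac

theorem pvPeel_none (r : Nat) : ∀ (j : Nat), 1 ≤ r →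
    (∀ m : Nat, j + 1 ≤ m → Nat.factorial m ≠ Nat.factorial (j + 1) * r) →
    pvPeel r j = none := by
  induction r using Nat.strong_induction_on with
  | _ r ih =>
    intro j hr hno
    rw [pvPeel]
    by_cases hr1 : r ≤ 1
    · exfalso
      have : r = 1 := by omega
      subst this
      exact hno (j+1) (le_refl _) (by omega)
    · by_cases hdvd : (j+2) ∣ r
      · obtain ⟨r', hr'⟩ := hdvd
        have hdiv : r / (j+2) = r' := by rw [hr']; exact Nat.mul_div_cancel_left r' (by omega)
        have hmod : r % (j+2) = 0 := by rw [hr']; exact Nat.mul_mod_right _ _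
        simp only [hr1, if_false, hmod, ne_eq, not_true_eq_false, if_false]
        rw [hdiv]
        have hr'pos : 1 ≤ r' := by
          rcases Nat.eq_zero_or_pos r' with h0 | h0
          · subst h0; simp at hr'; omega
          · exact h0
        have hr'lt : r' < r := by nlinarith
        refine ih r' hr'lt (j+1) hr'pos ?_
        intro m hm
        have hfe : Nat.factorial (j+2) * r' = Nat.factorial (j+1) * r := by
          rw [Nat.factorial_succ, hr']; ring
        rw [hfe]
        exact hno m (by omega)
      · have hmod : r % (j+2) ≠ 0 := fun hz => hdvd (Nat.dvd_of_mod_eq_zero hz)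
        simp [hr1, hmod]

-- ===== VERDICT (by name: the statement is the Claim_ definition above) =====
theorem find_n_by_factorial_spec : Claim_equal_find_n_by_factorial := by
  intro F _
  unfold Spec_find_n_by_factorial find_n_by_factorial find_n_by_factorial_alt
  by_cases hF : F < 1
  · simp [hF]
  · simp only [hF, if_false]
    have hF1 : 1 ≤ F := by omega
    have hFt : ((F.toNat : Nat) : Int) = F := by omega
    by_cases hex : ∃ m : Nat, 1 ≤ m ∧ ((Nat.factorial m : Nat) : Int) = F
    · obtain ⟨m, hm1, hmF⟩ := hex
      have hmF' : Nat.factorial m = F.toNat := by omega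
      have hA : pvLoopA (F.toNat + 1) F 1 1 = some (m : Int) := by
        have hmle : m ≤ Nat.factorial m := Nat.self_le_factorial m
        have := pvLoopA_some (F.toNat + 1) F 1 m (le_refl 1) hm1 hmF (by omega)
        simpa [Nat.factorial] using this
      have hB : pvPeel F.toNat 0 = some (m : Int) := by
        exact pvPeel_some F.toNat 0 m hm1 (by simpa [Nat.factorial] using hmF'.symm)
      rw [hA, hB]
    · rw [not_exists] at hex
      simp only [not_and] at hex
      have hA : pvLoopA (F.toNat + 1) F 1 1 = none := by
        have := pvLoopA_none (F.toNat + 1) F 1 (le_refl 1) (fun m hm => hex m hm)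
        simpa [Nat.factorial] using this
      have hB : pvPeel F.toNat 0 = none := by
        refine pvPeel_none F.toNat 0 (by omega) ?_
        intro m hm hcon
        apply hex m hm
        have : Nat.factorial m = F.toNat := by simpa [Nat.factorial] using hcon
        omega
      rw [hA, hB]
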